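-- pv_equiv track=rewrite | github.com/AnotherBobSmith/CLUZ | cluz_functions3.py | check_pu_shape_file_duplicate_pu_id_value
-- ===== SOURCE A (Python) =====
-- def check_pu_shape_file_duplicate_pu_id_value(shape_error_set, pu_id_list):
--     pu_id_set = set(pu_id_list)
--     duplicate_id_text = 'The following planning unit ID values appear more than once in the Unit_ID field: '
--     if len(pu_id_list) != len(pu_id_set):
--         shape_error_set.add('duplicateFeatID')
--         duplicate_set = set([x for x in pu_id_list if pu_id_list.count(x) > 1])
--         duplicate_list = list(duplicate_set)
--         duplicate_list.sort()
--         for aNum in duplicate_list: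
--             duplicate_id_text += str(aNum) + ', '
--         duplicate_id_text = duplicate_id_text[0:-2]
--
--     return shape_error_set, pu_id_set, duplicate_id_text
-- ===== SOURCE B (Python) =====
-- def check_pu_shape_file_duplicate_pu_id_value(shape_error_set, pu_id_list):
--     pu_id_set = set(pu_id_list)
--     duplicate_id_text = 'The following planning unit ID values appear more than once in the Unit_ID field: '
--     if len(pu_id_list) != len(pu_id_set):
--         shape_error_set.add('duplicateFeatID')
--         srt = sorted(pu_id_list)
--         n = len(srt)
--         i = 0
--         while i < n:
--             j = i + 1
--             while j < n and srt[j] == srt[i]: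
--                 j += 1
--             if j - i > 1:
--                 duplicate_id_text += str(srt[i]) + ', '
--             i = j
--         duplicate_id_text = duplicate_id_text[0:-2]
--     return shape_error_set, pu_id_set, duplicate_id_text
-- ===== Notes on version B (the rewrite author's own statement) =====
-- stated objective: faster
-- what changed: B never counts anything: it sorts the list once and emits the message in a single run-length scan over the sorted list (a value whose run is longer than 1 is a duplicate, and equal values are adjacent, so each duplicate is emitted exactly once and already in sorted order), replacing A's quadratic count-per-element pass, intermediate duplicate set and separate sort of it.
import Mathlib
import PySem

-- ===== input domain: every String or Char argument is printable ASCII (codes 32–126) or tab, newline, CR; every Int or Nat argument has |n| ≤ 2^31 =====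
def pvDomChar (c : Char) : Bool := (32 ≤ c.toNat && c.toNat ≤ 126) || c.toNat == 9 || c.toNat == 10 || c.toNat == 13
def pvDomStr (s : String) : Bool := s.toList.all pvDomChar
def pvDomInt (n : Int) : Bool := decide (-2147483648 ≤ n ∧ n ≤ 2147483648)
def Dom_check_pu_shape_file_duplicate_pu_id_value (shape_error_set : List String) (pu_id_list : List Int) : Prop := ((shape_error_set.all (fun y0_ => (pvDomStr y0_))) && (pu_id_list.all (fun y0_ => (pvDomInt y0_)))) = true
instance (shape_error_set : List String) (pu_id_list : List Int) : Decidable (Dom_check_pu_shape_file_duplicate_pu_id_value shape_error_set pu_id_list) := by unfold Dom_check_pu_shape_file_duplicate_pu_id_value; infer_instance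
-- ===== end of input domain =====

-- B sorts the list once and emits the message in a single run-length scan over the sorted list
-- (duplicates are adjacent there), instead of A's count-per-element pass, duplicate set and second
-- sort (objective: faster). A mutates shape_error_set in place via set.add; B performs the same
-- mutation, so side effects agree too.

-- ===== PORT A =====
def check_pu_shape_file_duplicate_pu_id_value (shape_error_set : List String) (pu_id_list : List Int) : List String × List Int × String :=
  let pu_id_set : PySem.Set Int := PySem.Set.ofList pu_id_list
  let duplicate_id_text := "The following planning unit ID values appear more than once in the Unit_ID field: "
  if ((pu_id_list.length : Int) ≠ PySem.Set.len pu_id_set) then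
    let shape_error_set := PySem.Set.add shape_error_set "duplicateFeatID"
    let duplicate_set : PySem.Set Int := PySem.Set.ofList (pu_id_list.filter (fun x => PySem.List.count pu_id_list x > 1))
    -- list(duplicate_set) has hash order in Python; the immediate .sort() makes the result the
    -- sorted list of duplicate_set, which is how it is ported.
    let duplicate_list := PySem.List.sorted duplicate_set (fun x => x)
    let duplicate_id_text := duplicate_list.foldl (fun t a => t ++ PySem.Int.toStr a ++ ", ") duplicate_id_text
    let duplicate_id_text := PySem.Str.slice duplicate_id_text (some 0) (some (-2))
    (shape_error_set, pu_id_set, duplicate_id_text)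
  else
    (shape_error_set, pu_id_set, duplicate_id_text)

-- ===== PORT B =====
-- B's outer while loop over the sorted list: each step consumes one run of equal values
-- (the inner `while j < n and srt[j] == srt[i]` = takeWhile/dropWhile) and appends
-- `str(srt[i]) + ', '` when the run is longer than 1 (j - i > 1).
def scanDupText (l : List Int) (t : String) : String :=
  match l with
  | [] => t
  | x :: rest =>
      scanDupText (rest.dropWhile (fun y => y == x))
        (if (rest.takeWhile (fun y => y == x)).length > 0 then t ++ PySem.Int.toStr x ++ ", " else t)
termination_by l.length
decreasing_by
  simp only [List.length_cons]
  exact Nat.lt_succ_of_le (List.length_dropWhile_le _ _)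

def check_pu_shape_file_duplicate_pu_id_value_alt (shape_error_set : List String) (pu_id_list : List Int) : List String × List Int × String :=
  let pu_id_set : PySem.Set Int := PySem.Set.ofList pu_id_list
  let duplicate_id_text := "The following planning unit ID values appear more than once in the Unit_ID field: "
  if ((pu_id_list.length : Int) ≠ PySem.Set.len pu_id_set) then
    let shape_error_set := PySem.Set.add shape_error_set "duplicateFeatID"
    let srt := PySem.List.sorted pu_id_list (fun x => x)
    let duplicate_id_text := scanDupText srt duplicate_id_text
    let duplicate_id_text := PySem.Str.slice duplicate_id_text (some 0) (some (-2))
    (shape_error_set, pu_id_set, duplicate_id_text)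
  else
    (shape_error_set, pu_id_set, duplicate_id_text)

-- ===== PRECONDITION & SPEC =====
def Spec_check_pu_shape_file_duplicate_pu_id_value (shape_error_set : List String) (pu_id_list : List Int) (out : List String × List Int × String) : Prop := out = check_pu_shape_file_duplicate_pu_id_value_alt shape_error_set pu_id_list
instance (shape_error_set : List String) (pu_id_list : List Int) (out : List String × List Int × String) : Decidable (Spec_check_pu_shape_file_duplicate_pu_id_value shape_error_set pu_id_list out) := by unfold Spec_check_pu_shape_file_duplicate_pu_id_value; infer_instance

-- ===== CLAIM (what is proved, stated in full; the proofs are below) =====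
def Claim_equal_check_pu_shape_file_duplicate_pu_id_value : Prop := ∀ (shape_error_set : List String) (pu_id_list : List Int), Dom_check_pu_shape_file_duplicate_pu_id_value shape_error_set pu_id_list → Spec_check_pu_shape_file_duplicate_pu_id_value shape_error_set pu_id_list (check_pu_shape_file_duplicate_pu_id_value shape_error_set pu_id_list)

-- ===== LEMMAS AND PROOFS =====

-- The list of duplicate values B's scan emits, with the same run-by-run recursion as scanDupText.
def dupsList (l : List Int) : List Int :=
  match l with
  | [] => []
  | x :: rest =>
      (if (rest.takeWhile (fun y => y == x)).length > 0 then [x] else []) ++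
        dupsList (rest.dropWhile (fun y => y == x))
termination_by l.length
decreasing_by
  simp only [List.length_cons]
  exact Nat.lt_succ_of_le (List.length_dropWhile_le _ _)

theorem scan_eq_foldl (l : List Int) : ∀ t : String,
    scanDupText l t = (dupsList l).foldl (fun t a => t ++ PySem.Int.toStr a ++ ", ") t := by
  induction l using dupsList.induct with
  | case1 => intro t; simp [scanDupText, dupsList]
  | case2 x rest ih =>
    intro t
    rw [scanDupText, dupsList, List.foldl_append]
    rw [ih]
    by_cases h : (rest.takeWhile (fun y => y == x)).length > 0 <;> simp [h]

-- In a sorted list, everything surviving dropWhile (== x) on the tail is strictly greater than x.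
theorem lt_of_mem_dropWhile (x : Int) (rest : List Int) (hp : (x :: rest).Pairwise (· ≤ ·)) :
    ∀ y ∈ rest.dropWhile (fun y => y == x), x < y := by
  cases hd : rest.dropWhile (fun y => y == x) with
  | nil => simp
  | cons h tl =>
    have hsub : (h :: tl).Sublist rest := hd ▸ List.dropWhile_sublist _
    have hrest : rest.Pairwise (· ≤ ·) := (List.pairwise_cons.mp hp).2
    have hple : (h :: tl).Pairwise (· ≤ ·) := hrest.sublist hsub
    have hxh : x ≤ h := (List.pairwise_cons.mp hp).1 h (hsub.subset (List.mem_cons_self))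
    have hne : ¬ ((h == x) = true) := by
      have h1 := List.head_dropWhile_not (p := fun y => y == x) (l := rest) (by rw [hd]; simp)
      have h2 : (List.dropWhile (fun y => y == x) rest).head (by rw [hd]; simp) = h := by
        simp [hd]
      rw [h2] at h1
      simp [h1]
    have hxh' : x < h := lt_of_le_of_ne hxh (fun he => hne (by simp [he]))
    intro y hy
    rcases List.mem_cons.mp hy with rfl | hmem
    · exact hxh'
    · exact lt_of_lt_of_le hxh' ((List.pairwise_cons.mp hple).1 y hmem)

theorem dupsList_nil : dupsList [] = [] := by rw [dupsList]

theorem dupsList_props (l : List Int) (hs : l.Pairwise (· ≤ ·)) :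
    (∀ a : Int, a ∈ dupsList l ↔ 2 ≤ l.count a) ∧ (dupsList l).Pairwise (· < ·) := by
  induction l using dupsList.induct with
  | case1 => simp [dupsList_nil]
  | case2 x rest ih =>
    have hrest : rest.Pairwise (· ≤ ·) := (List.pairwise_cons.mp hs).2
    have hs' : (rest.dropWhile (fun y => y == x)).Pairwise (· ≤ ·) :=
      hrest.sublist (List.dropWhile_sublist _)
    have hgt : ∀ y ∈ rest.dropWhile (fun y => y == x), x < y := lt_of_mem_dropWhile x rest hs
    have hrun_eq : ∀ y ∈ rest.takeWhile (fun y => y == x), y = x := by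
      intro y hy
      have := List.mem_takeWhile_imp hy
      simpa using this
    obtain ⟨ihm, ihp⟩ := ih hs'
    have hmem_sub : ∀ a ∈ dupsList (rest.dropWhile (fun y => y == x)),
        a ∈ rest.dropWhile (fun y => y == x) := by
      intro a ha
      have := (ihm a).mp ha
      exact List.count_pos_iff.mp (by omega)
    constructor
    · intro a
      rw [dupsList]
      have hsplit : List.count a rest
          = List.count a (rest.takeWhile (fun y => y == x))
            + List.count a (rest.dropWhile (fun y => y == x)) := by
        conv_lhs => rw [← List.takeWhile_append_dropWhile (p := fun y => y == x) (l := rest)]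
        rw [List.count_append]
      have hcount : List.count a (x :: rest)
          = List.count a (rest.takeWhile (fun y => y == x))
            + List.count a (rest.dropWhile (fun y => y == x))
            + (if x = a then 1 else 0) := by
        rw [List.count_cons, hsplit]
        simp [beq_iff_eq]
      rw [hcount, List.mem_append]
      by_cases hax : a = x
      · subst hax
        have hcnt0 : (rest.dropWhile (fun y => y == a)).count a = 0 := by
          rw [List.count_eq_zero]
          intro hmem
          exact absurd rfl (ne_of_lt (hgt a hmem))
        have hcnt_run : (rest.takeWhile (fun y => y == a)).count a =
            (rest.takeWhile (fun y => y == a)).length :=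
          List.count_eq_length.mpr (fun b hb => (hrun_eq b hb).symm)
        have hnotin : a ∉ dupsList (rest.dropWhile (fun y => y == a)) := fun hmem => by
          have := (ihm a).mp hmem
          omega
        rw [hcnt0, hcnt_run, if_pos rfl]
        constructor
        · rintro (hin | hin)
          · split_ifs at hin with hc
            · omega
            · simp at hin
          · exact absurd hin hnotin
        · intro hge
          left
          have hc : 0 < (rest.takeWhile (fun y => y == a)).length := by omega
          simp [hc]
      · have hcnt_run : (rest.takeWhile (fun y => y == x)).count a = 0 := by
          rw [List.count_eq_zero]
          intro hmem
          exact hax (hrun_eq a hmem)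
        rw [hcnt_run, if_neg (show ¬ x = a from fun h => hax h.symm)]
        constructor
        · rintro (hin | hin)
          · split_ifs at hin with hc <;> simp at hin
            exact absurd hin hax
          · have := (ihm a).mp hin
            omega
        · intro hge
          right
          exact (ihm a).mpr (by omega)
    · rw [dupsList]
      rw [List.pairwise_append]
      refine ⟨?_, ihp, ?_⟩
      · split_ifs <;> simp
      · intro a ha b hb
        split_ifs at ha with hc
        · rw [List.mem_singleton] at ha
          subst ha
          exact hgt b (hmem_sub b hb)
        · simp at ha

-- A's sorted list of values occurring more than once = B's run-length scan of the sorted input.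
theorem dup_lists_eq (xs : List Int) :
    PySem.List.sorted (PySem.Set.ofList (xs.filter (fun x => PySem.List.count xs x > 1))) (fun x => x)
      = dupsList (PySem.List.sorted xs (fun x => x)) := by
  set srt := PySem.List.sorted xs (fun x => x) with hsrt
  have hsp : srt.Pairwise (· ≤ ·) := by
    have := PySem.List.sorted_pairwise (xs := xs) (key := fun x => x)
    simpa using this
  obtain ⟨hmem, hpw⟩ := dupsList_props srt hsp
  apply PySem.List.sorted_eq_of_perm_of_pairwise_lt
  · have hcnt : ∀ a : Int, srt.count a = xs.count a := fun a =>
      (PySem.List.sorted_perm (xs := xs) (key := fun x => x) (rev := false)).count_eq a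
    rw [List.perm_ext_iff_of_nodup (hpw.imp ne_of_lt) (PySem.Set.nodup_ofList _)]
    intro a
    rw [hmem a, hcnt a, PySem.Set.mem_ofList, List.mem_filter]
    simp only [PySem.List.count_eq, gt_iff_lt, decide_eq_true_eq]
    constructor
    · intro h
      exact ⟨List.count_pos_iff.mp (by omega), by exact_mod_cast h⟩
    · rintro ⟨_, h⟩
      exact_mod_cast h
  · simpa using hpw

-- ===== VERDICT (by name: the statement is the Claim_ definition above) =====
theorem check_pu_shape_file_duplicate_pu_id_value_spec : Claim_equal_check_pu_shape_file_duplicate_pu_id_value := by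
  intro ses xs _
  unfold Spec_check_pu_shape_file_duplicate_pu_id_value
  unfold check_pu_shape_file_duplicate_pu_id_value check_pu_shape_file_duplicate_pu_id_value_alt
  by_cases h : ((xs.length : Int) ≠ PySem.Set.len (PySem.Set.ofList xs))
  · simp only [if_pos h]
    refine Prod.ext rfl (Prod.ext rfl ?_)
    rw [scan_eq_foldl, ← dup_lists_eq]
  · simp only [if_neg h]
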